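-- pv_equiv track=rewrite | github.com/juhlinm/aoc24 | day9/p3.py | find_dot_sequence
-- ===== SOURCE A (Python) =====
-- def find_dot_sequence(lst, dot_index):
--     seq, curr = 0, -1
--     for i, item in enumerate(lst):
--         if item == '.':
--             if curr == -1: curr, seq = seq, seq + 1
--         else:
--             curr = -1
--         if i == dot_index: return curr
--     return -1
-- ===== SOURCE B (Python) =====
-- def find_dot_sequence(lst, dot_index):
--     # Stage 1: run-length encode the list into (value, length) chunks.
--     runs = []
--     i, n = 0, len(lst)
--     while i < n:
--         j = i + 1
--         while j < n and lst[j] == lst[i]: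
--             j += 1
--         runs.append((lst[i], j - i))
--         i = j
--     # Stage 2: scan the chunks, counting dot chunks, until the one holding dot_index.
--     pos, dot_runs = 0, 0
--     for key, m in runs:
--         if pos <= dot_index < pos + m:
--             return dot_runs if key == '.' else -1
--         if key == '.':
--             dot_runs += 1
--         pos += m
--     return -1
-- ===== Notes on version B (the rewrite author's own statement) =====
-- stated objective: alternative
-- what changed: Replaces A's single stateful pass (seq/curr with early return) by two staged passes: first run-length encode the list into (value, length) chunks, then scan the chunks counting dot chunks until the one containing dot_index.
import Mathlib
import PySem

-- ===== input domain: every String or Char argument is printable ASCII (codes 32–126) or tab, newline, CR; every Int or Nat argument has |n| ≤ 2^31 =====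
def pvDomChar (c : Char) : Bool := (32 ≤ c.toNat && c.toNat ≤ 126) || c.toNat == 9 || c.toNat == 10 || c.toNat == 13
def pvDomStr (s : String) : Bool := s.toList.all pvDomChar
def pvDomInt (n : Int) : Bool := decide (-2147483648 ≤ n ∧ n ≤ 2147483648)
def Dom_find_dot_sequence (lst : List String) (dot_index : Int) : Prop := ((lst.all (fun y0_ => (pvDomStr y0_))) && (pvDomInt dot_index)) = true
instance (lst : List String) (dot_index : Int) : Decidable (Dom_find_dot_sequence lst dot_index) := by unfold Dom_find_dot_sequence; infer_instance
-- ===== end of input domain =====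

-- B replaces A's single stateful pass (seq/curr, early return) by two staged passes:
-- run-length encode the list into (value, length) chunks, then scan the chunks (alternative).


-- ===== PORT A =====
-- the for-loop over enumerate(lst): carried index i, state (seq, curr), early return when i == dot_index
def fds_goA : List String → Nat → Int → Int → Int → Int
  | [], _, _, _, _ => -1
  | item :: rest, i, seq, curr, d =>
    let p : Int × Int :=
      if item == "." then (if curr == -1 then (seq + 1, seq) else (seq, curr))
      else (seq, -1)
    if (i : Int) == d then p.2 else fds_goA rest (i + 1) p.1 p.2 d

def find_dot_sequence (lst : List String) (dot_index : Int) : Int :=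
  fds_goA lst 0 0 (-1) dot_index

-- ===== PORT B =====
-- inner while of stage 1: j - i counts the run, i.e. the leading elements equal to lst[i]
def fds_runlen (h : String) : List String → Nat
  | [] => 0
  | y :: ys => if y == h then fds_runlen h ys + 1 else 0

-- stage 1: the outer while loop building runs = [(lst[i], j - i), …], advancing i to j
-- (recursion on the list suffix starting at i; the run length is 1 + the matching prefix of the rest)
def fds_rle : List String → List (String × Nat)
  | [] => []
  | x :: xs => (x, 1 + fds_runlen x xs) :: fds_rle (xs.drop (fds_runlen x xs))
termination_by l => l.length
decreasing_by simp [List.length_drop]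

-- stage 2: the for-loop over runs with carried pos and dot_runs
def fds_scan : List (String × Nat) → Int → Int → Int → Int
  | [], _, _, _ => -1
  | (key, n) :: rs, pos, dotRuns, d =>
    if pos ≤ d ∧ d < pos + (n : Int) then (if key == "." then dotRuns else -1)
    else fds_scan rs (pos + (n : Int)) (if key == "." then dotRuns + 1 else dotRuns) d

def find_dot_sequence_alt (lst : List String) (dot_index : Int) : Int :=
  fds_scan (fds_rle lst) 0 0 dot_index

-- ===== PRECONDITION & SPEC =====
def Spec_find_dot_sequence (lst : List String) (dot_index : Int) (out : Int) : Prop := out = find_dot_sequence_alt lst dot_index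
instance (lst : List String) (dot_index : Int) (out : Int) : Decidable (Spec_find_dot_sequence lst dot_index out) := by unfold Spec_find_dot_sequence; infer_instance

-- ===== CLAIM (what is proved, stated in full; the proofs are below) =====
def Claim_equal_find_dot_sequence : Prop := ∀ (lst : List String) (dot_index : Int), Dom_find_dot_sequence lst dot_index → Spec_find_dot_sequence lst dot_index (find_dot_sequence lst dot_index)

-- ===== LEMMAS AND PROOFS =====

-- reference count: number of dot-run starts among the first n elements, given the previous element
def fds_cnt : List String → String → Nat → Int
  | _, _, 0 => 0
  | [], _, _ + 1 => 0
  | x :: xs, prev, n + 1 =>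
    (if x = "." ∧ prev ≠ "." then 1 else 0) + fds_cnt xs x n

theorem fds_cnt_zero (xs : List String) (prev : String) : fds_cnt xs prev 0 = 0 := by
  cases xs <;> rfl

-- the target condition on x :: t split into "hit at i" and "hit further right"
theorem fds_cond_split (x : String) (t : List String) (i : Nat) (d : Int) :
    ((i : Int) ≤ d ∧ d < (i : Int) + ((x :: t : List String)).length ∧ (x :: t).getD (d.toNat - i) "" = ".")
    ↔ (((i : Int) = d ∧ x = ".") ∨
       (((i + 1 : Nat) : Int) ≤ d ∧ d < ((i + 1 : Nat) : Int) + t.length ∧ t.getD (d.toNat - (i + 1)) "" = ".")) := by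
  constructor
  · rintro ⟨h1, h2, h3⟩
    simp only [List.length_cons] at h2
    push_cast at h2
    by_cases hid : (i : Int) = d
    · refine Or.inl ⟨hid, ?_⟩
      have hz : d.toNat - i = 0 := by omega
      rw [hz] at h3
      simpa using h3
    · refine Or.inr ⟨by push_cast; omega, by push_cast; omega, ?_⟩
      have hz : d.toNat - i = (d.toNat - (i + 1)) + 1 := by omega
      rw [hz] at h3
      simpa using h3
  · rintro (⟨hid, hx⟩ | ⟨h1, h2, h3⟩)
    · refine ⟨hid.le, by simp only [List.length_cons]; push_cast; omega, ?_⟩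
      have hz : d.toNat - i = 0 := by omega
      rw [hz]
      simpa using hx
    · push_cast at h1 h2
      refine ⟨by omega, by simp only [List.length_cons]; push_cast; omega, ?_⟩
      have hz : d.toNat - i = (d.toNat - (i + 1)) + 1 := by omega
      rw [hz]
      simpa using h3

theorem fds_goA_cons (x : String) (t : List String) (i : Nat) (seq curr d : Int) :
    fds_goA (x :: t) i seq curr d =
      (let p : Int × Int :=
        if x == "." then (if curr == -1 then (seq + 1, seq) else (seq, curr))
        else (seq, -1)
      if (i : Int) == d then p.2 else fds_goA t (i + 1) p.1 p.2 d) := rfl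

-- A's loop computes the closed form, under the invariant curr = (dot-run index iff prev was a dot)
theorem fds_goA_spec (xs : List String) (i : Nat) (prev : String) (seq curr d : Int)
    (hseq : 0 ≤ seq) (hprev : prev = "." → 1 ≤ seq)
    (hcurr : curr = if prev = "." then seq - 1 else -1) :
    fds_goA xs i seq curr d =
      if (i : Int) ≤ d ∧ d < (i : Int) + xs.length ∧ xs.getD (d.toNat - i) "" = "."
      then seq + fds_cnt xs prev (d.toNat - i + 1) - 1
      else -1 := by
  induction xs generalizing i prev seq curr with
  | nil =>
    have hnc : ¬ ((i : Int) ≤ d ∧ d < (i : Int) + ([] : List String).length ∧ ([] : List String).getD (d.toNat - i) "" = ".") := by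
      rintro ⟨h1, h2, -⟩
      simp only [List.length_nil] at h2
      push_cast at h2
      omega
    rw [if_neg hnc]
    rfl
  | cons x t ih =>
    have hsplit := fds_cond_split x t i d
    by_cases hx : x = "."
    · subst hx
      by_cases hp : prev = "."
      · -- inside a dot run: curr = seq - 1 ≠ -1, state unchanged
        have h1 : 1 ≤ seq := hprev hp
        have hc : curr = seq - 1 := by rw [hcurr, if_pos hp]
        have hcb : (curr == (-1 : Int)) = false := by simp [hc]; omega
        rw [fds_goA_cons]
        simp only [beq_self_eq_true, if_true, hcb, Bool.false_eq_true, if_false]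
        by_cases hid : (i : Int) = d
        · rw [if_pos (show ((i : Int) == d) = true from by simp [hid]),
            if_pos (hsplit.mpr (Or.inl ⟨hid, rfl⟩))]
          have hz : d.toNat - i = 0 := by omega
          rw [hz]
          have hr : fds_cnt ("." :: t) prev (0 + 1)
              = (if ("." : String) = "." ∧ prev ≠ "." then 1 else 0) + fds_cnt t "." 0 := rfl
          rw [hr, fds_cnt_zero, if_neg (fun h => h.2 hp), hc]
          omega
        · rw [if_neg (show ¬ ((i : Int) == d) = true from by simp [hid])]
          rw [ih (i + 1) "." seq curr hseq (fun _ => h1) (by rw [hc, if_pos rfl])]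
          by_cases hC : ((i + 1 : Nat) : Int) ≤ d ∧ d < ((i + 1 : Nat) : Int) + t.length ∧ t.getD (d.toNat - (i + 1)) "" = "."
          · have hii : (i : Int) < d := by have := hC.1; push_cast at this; omega
            have hk : d.toNat - i + 1 = (d.toNat - (i + 1) + 1) + 1 := by omega
            rw [if_pos hC, if_pos (hsplit.mpr (Or.inr hC)), hk]
            have hr : fds_cnt ("." :: t) prev ((d.toNat - (i + 1) + 1) + 1)
                = (if ("." : String) = "." ∧ prev ≠ "." then 1 else 0) + fds_cnt t "." (d.toNat - (i + 1) + 1) := rfl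
            rw [hr, if_neg (fun h => h.2 hp)]
            omega
          · rw [if_neg hC, if_neg]
            intro h
            rcases hsplit.mp h with ⟨hid', -⟩ | h'
            · exact hid hid'
            · exact hC h'
      · -- a dot run starts here: curr = -1, new state (seq + 1, seq)
        have hc : curr = -1 := by rw [hcurr, if_neg hp]
        have hcb : (curr == (-1 : Int)) = true := by simp [hc]
        rw [fds_goA_cons]
        simp only [beq_self_eq_true, if_true, hcb]
        by_cases hid : (i : Int) = d
        · rw [if_pos (show ((i : Int) == d) = true from by simp [hid]),
            if_pos (hsplit.mpr (Or.inl ⟨hid, rfl⟩))]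
          have hz : d.toNat - i = 0 := by omega
          rw [hz]
          have hr : fds_cnt ("." :: t) prev (0 + 1)
              = (if ("." : String) = "." ∧ prev ≠ "." then 1 else 0) + fds_cnt t "." 0 := rfl
          rw [hr, fds_cnt_zero, if_pos ⟨rfl, hp⟩]
          omega
        · rw [if_neg (show ¬ ((i : Int) == d) = true from by simp [hid])]
          rw [ih (i + 1) "." (seq + 1) seq (by omega) (fun _ => by omega) (by rw [if_pos rfl]; omega)]
          by_cases hC : ((i + 1 : Nat) : Int) ≤ d ∧ d < ((i + 1 : Nat) : Int) + t.length ∧ t.getD (d.toNat - (i + 1)) "" = "."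
          · have hii : (i : Int) < d := by have := hC.1; push_cast at this; omega
            have hk : d.toNat - i + 1 = (d.toNat - (i + 1) + 1) + 1 := by omega
            rw [if_pos hC, if_pos (hsplit.mpr (Or.inr hC)), hk]
            have hr : fds_cnt ("." :: t) prev ((d.toNat - (i + 1) + 1) + 1)
                = (if ("." : String) = "." ∧ prev ≠ "." then 1 else 0) + fds_cnt t "." (d.toNat - (i + 1) + 1) := rfl
            rw [hr, if_pos ⟨rfl, hp⟩]
            omega
          · rw [if_neg hC, if_neg]
            intro h
            rcases hsplit.mp h with ⟨hid', -⟩ | h'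
            · exact hid hid'
            · exact hC h'
    · -- not a dot: curr := -1, seq unchanged
      have hxb : (x == ".") = false := by simp [hx]
      rw [fds_goA_cons]
      simp only [hxb, Bool.false_eq_true, if_false]
      by_cases hid : (i : Int) = d
      · have hnC : ¬ ((i : Int) ≤ d ∧ d < (i : Int) + ((x :: t : List String)).length ∧ (x :: t).getD (d.toNat - i) "" = ".") := by
          intro h
          rcases hsplit.mp h with ⟨-, hx'⟩ | ⟨h1', -, -⟩
          · exact hx hx'
          · push_cast at h1'; omega
        rw [if_pos (show ((i : Int) == d) = true from by simp [hid]), if_neg hnC]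
      · rw [if_neg (show ¬ ((i : Int) == d) = true from by simp [hid])]
        rw [ih (i + 1) x seq (-1) hseq (fun h => absurd h hx) (by rw [if_neg hx])]
        by_cases hC : ((i + 1 : Nat) : Int) ≤ d ∧ d < ((i + 1 : Nat) : Int) + t.length ∧ t.getD (d.toNat - (i + 1)) "" = "."
        · have hii : (i : Int) < d := by have := hC.1; push_cast at this; omega
          have hk : d.toNat - i + 1 = (d.toNat - (i + 1) + 1) + 1 := by omega
          rw [if_pos hC, if_pos (hsplit.mpr (Or.inr hC)), hk]
          have hr : fds_cnt (x :: t) prev ((d.toNat - (i + 1) + 1) + 1)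
              = (if x = "." ∧ prev ≠ "." then 1 else 0) + fds_cnt t x (d.toNat - (i + 1) + 1) := rfl
          rw [hr, if_neg (fun h => hx h.1)]
          omega
        · rw [if_neg hC, if_neg]
          intro h
          rcases hsplit.mp h with ⟨hid', -⟩ | h'
          · exact hid hid'
          · exact hC h'

-- ---- B-side lemmas: the run-length encoding scan computes the same closed form ----

theorem fds_runlen_le (x : String) (xs : List String) : fds_runlen x xs ≤ xs.length := by
  induction xs with
  | nil => simp [fds_runlen]
  | cons y t ih =>
    simp only [fds_runlen, List.length_cons]
    split_ifs <;> omega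

theorem fds_runlen_get (x : String) (xs : List String) (j : Nat)
    (hj : j < fds_runlen x xs) : xs.getD j "" = x := by
  induction xs generalizing j with
  | nil => simp [fds_runlen] at hj
  | cons y t ih =>
    simp only [fds_runlen] at hj
    by_cases hy : y = x
    · cases j with
      | zero => simpa using hy
      | succ j' =>
        rw [if_pos (by simp [hy])] at hj
        simpa using ih j' (by omega)
    · rw [if_neg (by simp [hy])] at hj
      omega

theorem fds_runlen_drop (x : String) (xs : List String) :
    xs.drop (fds_runlen x xs) = [] ∨
    ∃ y t, xs.drop (fds_runlen x xs) = y :: t ∧ y ≠ x := by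
  induction xs with
  | nil => exact Or.inl rfl
  | cons y t ih =>
    by_cases hy : y = x
    · have : fds_runlen x (y :: t) = fds_runlen x t + 1 := by
        simp [fds_runlen, hy]
      rw [this, List.drop_succ_cons]
      exact ih
    · have : fds_runlen x (y :: t) = 0 := by simp [fds_runlen, hy]
      rw [this, List.drop_zero]
      exact Or.inr ⟨y, t, rfl, hy⟩

-- the run elements after the first contribute nothing: skip the run in one step
theorem fds_cnt_run_skip (x : String) (xs : List String) (n : Nat) :
    fds_cnt xs x n = fds_cnt (xs.drop (fds_runlen x xs)) x (n - fds_runlen x xs) := by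
  induction xs generalizing n with
  | nil => simp [fds_runlen]
  | cons y t ih =>
    by_cases hy : y = x
    · have hm : fds_runlen x (y :: t) = fds_runlen x t + 1 := by simp [fds_runlen, hy]
      cases n with
      | zero =>
        rw [fds_cnt_zero, hm]
        have h0 : 0 - (fds_runlen x t + 1) = 0 := by omega
        rw [h0, fds_cnt_zero]
      | succ n' =>
        have hstep : fds_cnt (y :: t) x (n' + 1)
            = (if y = "." ∧ x ≠ "." then 1 else 0) + fds_cnt t y n' := rfl
        have hz : (if y = "." ∧ x ≠ "." then 1 else 0) = (0 : Int) := by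
          rw [if_neg]; rintro ⟨h1, h2⟩; exact h2 (hy.symm.trans h1)
        rw [hm, List.drop_succ_cons, hstep, hz, zero_add, hy, ih n']
        congr 1
        omega
    · have hm : fds_runlen x (y :: t) = 0 := by simp [fds_runlen, hy]
      rw [hm, List.drop_zero, Nat.sub_zero]

-- the previous element only matters through "was it a dot": swap it when both are non-dots
theorem fds_cnt_prev_swap (ys : List String) (p q : String) (n : Nat)
    (hp : p ≠ ".") (hq : q ≠ ".") : fds_cnt ys p n = fds_cnt ys q n := by
  cases ys with
  | nil => cases n <;> rfl
  | cons y t =>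
    cases n with
    | zero => rfl
    | succ n' =>
      show (if y = "." ∧ p ≠ "." then 1 else 0) + fds_cnt t y n'
          = (if y = "." ∧ q ≠ "." then 1 else 0) + fds_cnt t y n'
      congr 1
      by_cases hy : y = "." <;> simp [hy, hp, hq]

-- or when the next element is not a dot
theorem fds_cnt_head_ne (y : String) (t : List String) (p q : String) (n : Nat)
    (hy : y ≠ ".") : fds_cnt (y :: t) p n = fds_cnt (y :: t) q n := by
  cases n with
  | zero => rfl
  | succ n' =>
    show (if y = "." ∧ p ≠ "." then 1 else 0) + fds_cnt t y n'
        = (if y = "." ∧ q ≠ "." then 1 else 0) + fds_cnt t y n'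
    simp [hy]

-- stage 2 over the encoding of xs computes the closed form
theorem fds_scan_rle (xs : List String) (pos c d : Int) (hpos : 0 ≤ pos) :
    fds_scan (fds_rle xs) pos c d =
      if pos ≤ d ∧ d < pos + xs.length ∧ xs.getD (d - pos).toNat "" = "."
      then c + fds_cnt xs "" ((d - pos).toNat + 1) - 1
      else -1 := by
  induction xs using fds_rle.induct generalizing pos c with
  | case1 =>
    rw [if_neg (by rintro ⟨h1, h2, -⟩; simp at h2; omega)]
    simp [fds_rle, fds_scan]
  | case2 x rest ih =>
    have hm := fds_runlen_le x rest
    set m := fds_runlen x rest with hmdef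
    set tail := rest.drop m with htail
    have hlen : (x :: rest).length = (m + 1) + tail.length := by
      simp [htail, List.length_drop]
      omega
    have hstep : fds_rle (x :: rest) = (x, 1 + m) :: fds_rle tail := by
      rw [fds_rle]
    rw [hstep]
    show (if pos ≤ d ∧ d < pos + ((1 + m : Nat) : Int) then (if x == "." then c else -1)
      else fds_scan (fds_rle tail) (pos + ((1 + m : Nat) : Int)) (if x == "." then c + 1 else c) d) = _
    by_cases hin : pos ≤ d ∧ d < pos + ((1 + m : Nat) : Int)
    · -- the target index falls inside this chunk
      rw [if_pos hin]
      obtain ⟨h1, h2⟩ := hin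
      have ht : (d - pos).toNat ≤ m := by push_cast at h2; omega
      have hget : (x :: rest).getD (d - pos).toNat "" = x := by
        cases hcase : (d - pos).toNat with
        | zero => rfl
        | succ j =>
          have : j < m := by omega
          simpa using fds_runlen_get x rest j this
      by_cases hx : x = "."
      · have hcond : pos ≤ d ∧ d < pos + ((x :: rest : List String)).length ∧ (x :: rest).getD (d - pos).toNat "" = "." := by
          refine ⟨h1, ?_, hget.trans hx⟩
          rw [hlen]; push_cast at h2 ⊢; omega
        rw [if_pos hcond, if_pos (by simp [hx])]
        -- fds_cnt (x :: rest) "" (t + 1) = 1  when t ≤ m and the chunk is dots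
        have hc1 : fds_cnt (x :: rest) "" ((d - pos).toNat + 1)
            = 1 + fds_cnt rest x (d - pos).toNat := by
          show (if x = "." ∧ ("" : String) ≠ "." then 1 else 0) + fds_cnt rest x (d - pos).toNat = _
          rw [if_pos ⟨hx, by decide⟩]
        have hc2 : fds_cnt rest x (d - pos).toNat = 0 := by
          rw [fds_cnt_run_skip, ← hmdef, ← htail]
          have : (d - pos).toNat - m = 0 := by omega
          rw [this, fds_cnt_zero]
        rw [hc1, hc2]
        ring
      · have hnc : ¬ (pos ≤ d ∧ d < pos + ((x :: rest : List String)).length ∧ (x :: rest).getD (d - pos).toNat "" = ".") := by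
          rintro ⟨-, -, hdot⟩
          exact hx (hget.symm.trans hdot)
        rw [if_neg (show ¬ ((x == ".") = true) from by simp [hx]), if_neg hnc]
    · -- the target is outside this chunk: recurse with pos + k and updated counter
      rw [if_neg hin]
      rw [ih (pos + ((1 + m : Nat) : Int)) (if x == "." then c + 1 else c) (by push_cast; omega)]
      by_cases hd : d < pos
      · have hA : ¬ (pos + ((1 + m : Nat) : Int) ≤ d ∧ d < pos + ((1 + m : Nat) : Int) + tail.length ∧ tail.getD (d - (pos + ((1 + m : Nat) : Int))).toNat "" = ".") := by
          rintro ⟨h1', -, -⟩; push_cast at h1'; omega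
        have hB : ¬ (pos ≤ d ∧ d < pos + ((x :: rest : List String)).length ∧ (x :: rest).getD (d - pos).toNat "" = ".") := by
          rintro ⟨h1', -, -⟩; omega
        rw [if_neg hA, if_neg hB]
      · -- d ≥ pos + (m + 1)
        have hge : pos + ((1 + m : Nat) : Int) ≤ d := by
          push_cast at hin ⊢; omega
        have ht1 : (d - pos).toNat = (m + (d - (pos + ((1 + m : Nat) : Int))).toNat) + 1 := by
          push_cast at hge ⊢; omega
        have hgeteq : (x :: rest).getD (d - pos).toNat "" = tail.getD (d - (pos + ((1 + m : Nat) : Int))).toNat "" := by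
          rw [List.getD_eq_getElem?_getD, List.getD_eq_getElem?_getD, ht1,
            List.getElem?_cons_succ, htail, List.getElem?_drop]
        have hcondiff : (pos ≤ d ∧ d < pos + ((x :: rest : List String)).length ∧ (x :: rest).getD (d - pos).toNat "" = ".")
            ↔ (pos + ((1 + m : Nat) : Int) ≤ d ∧ d < pos + ((1 + m : Nat) : Int) + tail.length ∧ tail.getD (d - (pos + ((1 + m : Nat) : Int))).toNat "" = ".") := by
          rw [hgeteq, hlen]
          constructor
          · rintro ⟨-, h2, h3⟩; exact ⟨hge, by push_cast at h2 ⊢; omega, h3⟩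
          · rintro ⟨-, h2, h3⟩; exact ⟨by omega, by push_cast at h2 ⊢; omega, h3⟩
        by_cases hC : pos + ((1 + m : Nat) : Int) ≤ d ∧ d < pos + ((1 + m : Nat) : Int) + tail.length ∧ tail.getD (d - (pos + ((1 + m : Nat) : Int))).toNat "" = "."
        · rw [if_pos hC, if_pos (hcondiff.mpr hC)]
          -- count over the whole list = chunk contribution + count over the tail
          have hc1 : fds_cnt (x :: rest) "" ((d - pos).toNat + 1)
              = (if x = "." then 1 else 0) + fds_cnt rest x (d - pos).toNat := by
            show (if x = "." ∧ ("" : String) ≠ "." then 1 else 0) + fds_cnt rest x (d - pos).toNat = _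
            congr 1
            by_cases hx : x = "." <;> simp [hx]
          have hc2 : fds_cnt rest x (d - pos).toNat
              = fds_cnt tail x ((d - (pos + ((1 + m : Nat) : Int))).toNat + 1) := by
            rw [fds_cnt_run_skip, ← hmdef, ← htail]
            congr 1
            omega
          have hc3 : fds_cnt tail x ((d - (pos + ((1 + m : Nat) : Int))).toNat + 1)
              = fds_cnt tail "" ((d - (pos + ((1 + m : Nat) : Int))).toNat + 1) := by
            rcases fds_runlen_drop x rest with hnil | ⟨y, t, heq, hyx⟩
            · rw [← htail] at hnil; rw [hnil]; rfl
            · rw [← htail] at heq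
              rw [heq]
              by_cases hx : x = "."
              · exact fds_cnt_head_ne y t x "" _ (fun h => hyx (h.trans hx.symm))
              · exact fds_cnt_prev_swap (y :: t) x "" _ hx (by decide)
          rw [hc1, hc2, hc3]
          by_cases hx : x = "."
          · simp [hx]; ring
          · simp [hx]
        · rw [if_neg hC, if_neg (fun h => hC (hcondiff.mp h))]

-- ===== VERDICT (by name: the statement is the Claim_ definition above) =====
theorem find_dot_sequence_spec : Claim_equal_find_dot_sequence := by
  intro lst d _
  unfold Spec_find_dot_sequence find_dot_sequence find_dot_sequence_alt
  rw [fds_goA_spec lst 0 "" 0 (-1) d le_rfl (fun h => absurd h (by decide))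
    (by rw [if_neg (by decide : ¬ ("" : String) = ".")]),
    fds_scan_rle lst 0 0 d le_rfl]
  simp only [Nat.cast_zero, zero_add, Int.sub_zero, Nat.sub_zero]
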